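-- pv_equiv track=rewrite | github.com/SeonggonKim/Programmers | 프로그래머스/lv0/120815. 피자 나눠 먹기 （2）/피자 나눠 먹기 （2）.py | solution
-- ===== SOURCE A (Python) =====
-- def solution(n):
--     n_list = [n]
--     while True:
--         if n_list[-1] % 6 != 0:
--             n_list.append(n_list[-1] + n)
--         else:
--             break
--     answer = n_list[-1] // 6
--     return answer
-- ===== SOURCE B (Python) =====
-- import math
--
-- def solution(n):
--     return n // math.gcd(n, 6)
-- ===== Notes on version B (the rewrite author's own statement) =====
-- stated objective: simpler
-- what changed: Replaced the while-loop search over multiples of n with the closed form n // gcd(n, 6) (the loop stops at lcm(n,6), whose quotient by 6 is n // gcd(n,6)).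
import Mathlib
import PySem

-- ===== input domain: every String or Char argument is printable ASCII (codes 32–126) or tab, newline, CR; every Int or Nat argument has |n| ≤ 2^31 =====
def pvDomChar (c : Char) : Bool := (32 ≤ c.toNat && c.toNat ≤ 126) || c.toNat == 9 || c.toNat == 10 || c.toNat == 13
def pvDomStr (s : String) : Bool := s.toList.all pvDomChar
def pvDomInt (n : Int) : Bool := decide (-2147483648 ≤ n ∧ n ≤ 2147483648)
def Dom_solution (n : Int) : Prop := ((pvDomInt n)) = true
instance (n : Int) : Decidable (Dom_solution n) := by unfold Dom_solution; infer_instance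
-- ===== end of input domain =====

-- B replaces A's while-loop over multiples of n with the closed form n // gcd(n, 6) (simpler).

-- ===== PORT A =====
-- A's while loop: keep appending n to the last multiple until it is divisible by 6.
-- Fuel 6 is a totality guard only: 6*n is always divisible by 6, so the loop stops within 6 steps.
def solutionLoop : Nat → Int → Int → Int
  | 0, cur, _ => cur
  | Nat.succ f, cur, n => if PySem.Int.mod cur 6 ≠ 0 then solutionLoop f (cur + n) n else cur

def solution (n : Int) : Int := PySem.Int.floordiv (solutionLoop 6 n n) 6

-- ===== PORT B =====
def solution_alt (n : Int) : Int := PySem.Int.floordiv n (Int.gcd n 6 : Int)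

-- ===== PRECONDITION & SPEC =====
def Spec_solution (n : Int) (out : Int) : Prop := out = solution_alt n
instance (n : Int) (out : Int) : Decidable (Spec_solution n out) := by unfold Spec_solution; infer_instance

-- ===== CLAIM (what is proved, stated in full; the proofs are below) =====
def Claim_equal_solution : Prop := ∀ (n : Int), Dom_solution n → Spec_solution n (solution n)

-- ===== LEMMAS AND PROOFS =====
theorem solutionLoop_step (f : Nat) (cur n : Int) (h : PySem.Int.mod cur 6 ≠ 0) :
    solutionLoop (Nat.succ f) cur n = solutionLoop f (cur + n) n := by
  simp only [solutionLoop]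
  rw [if_pos h]

theorem solutionLoop_stop (f : Nat) (cur n : Int) (h : PySem.Int.mod cur 6 = 0) :
    solutionLoop (Nat.succ f) cur n = cur := by
  simp only [solutionLoop]
  rw [if_neg (not_not_intro h)]

theorem mod6_eq (cur : Int) : PySem.Int.mod cur 6 = cur % 6 :=
  PySem.Int.mod_eq_emod_of_pos (by norm_num)

theorem solution_key (n : Int) : solution n = solution_alt n := by
  obtain ⟨q, r, hr0, hr6, hn⟩ : ∃ q r, 0 ≤ r ∧ r < 6 ∧ n = 6 * q + r :=
    ⟨n / 6, n % 6, Int.emod_nonneg n (by norm_num), Int.emod_lt_of_pos n (by norm_num), by omega⟩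
  have hg : (Int.gcd n 6 : Int) = (Int.gcd r 6 : Int) := by
    rw [← Int.gcd_emod n 6]
    congr 2
    omega
  subst hn
  rw [solution, solution_alt, hg,
      PySem.Int.floordiv_eq_ediv_of_pos (b := 6) (by norm_num)]
  interval_cases r
  · rw [show ((Int.gcd 0 6 : Int)) = 6 from by decide,
        solutionLoop_stop _ _ _ (by rw [mod6_eq]; omega),
        PySem.Int.floordiv_eq_ediv_of_pos (by norm_num)]
  · rw [show ((Int.gcd 1 6 : Int)) = 1 from by decide,
        solutionLoop_step _ _ _ (by rw [mod6_eq]; omega),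
        solutionLoop_step _ _ _ (by rw [mod6_eq]; omega),
        solutionLoop_step _ _ _ (by rw [mod6_eq]; omega),
        solutionLoop_step _ _ _ (by rw [mod6_eq]; omega),
        solutionLoop_step _ _ _ (by rw [mod6_eq]; omega),
        solutionLoop_stop _ _ _ (by rw [mod6_eq]; omega),
        PySem.Int.floordiv_eq_ediv_of_pos (by norm_num)]
    omega
  · rw [show ((Int.gcd 2 6 : Int)) = 2 from by decide,
        solutionLoop_step _ _ _ (by rw [mod6_eq]; omega),
        solutionLoop_step _ _ _ (by rw [mod6_eq]; omega),
        solutionLoop_stop _ _ _ (by rw [mod6_eq]; omega),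
        PySem.Int.floordiv_eq_ediv_of_pos (by norm_num)]
    omega
  · rw [show ((Int.gcd 3 6 : Int)) = 3 from by decide,
        solutionLoop_step _ _ _ (by rw [mod6_eq]; omega),
        solutionLoop_stop _ _ _ (by rw [mod6_eq]; omega),
        PySem.Int.floordiv_eq_ediv_of_pos (by norm_num)]
    omega
  · rw [show ((Int.gcd 4 6 : Int)) = 2 from by decide,
        solutionLoop_step _ _ _ (by rw [mod6_eq]; omega),
        solutionLoop_step _ _ _ (by rw [mod6_eq]; omega),
        solutionLoop_stop _ _ _ (by rw [mod6_eq]; omega),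
        PySem.Int.floordiv_eq_ediv_of_pos (by norm_num)]
    omega
  · rw [show ((Int.gcd 5 6 : Int)) = 1 from by decide,
        solutionLoop_step _ _ _ (by rw [mod6_eq]; omega),
        solutionLoop_step _ _ _ (by rw [mod6_eq]; omega),
        solutionLoop_step _ _ _ (by rw [mod6_eq]; omega),
        solutionLoop_step _ _ _ (by rw [mod6_eq]; omega),
        solutionLoop_step _ _ _ (by rw [mod6_eq]; omega),
        solutionLoop_stop _ _ _ (by rw [mod6_eq]; omega),
        PySem.Int.floordiv_eq_ediv_of_pos (by norm_num)]
    omega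

-- ===== VERDICT (by name: the statement is the Claim_ definition above) =====
theorem solution_spec : Claim_equal_solution := by
  intro n _
  exact (solution_key n).symm ▸ rfl
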